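-- pv_equiv track=rewrite | github.com/edbeeching/AA_LCS_Project | code_production/printing_neatly.py | find_num_words
-- ===== SOURCE A (Python) =====
-- def find_num_words(list_of_strings, lines_per_row):
--     # Function to find maximum number of words that cna fit on a line
--     counter = 0
--     index = 0
--     while(index < len(list_of_strings)):
--         counter += len(list_of_strings[index])
--         if counter > lines_per_row:
--             counter -= len(list_of_strings[index])
--             break
--         counter += 1
--         index += 1
--     return index
-- ===== SOURCE B (Python) =====
-- def find_num_words(list_of_strings, lines_per_row):
--     # Prefix sums of per-word costs len(w)+1; since they are strictly
--     # increasing, the number of prefixes <= lines_per_row + 1 equals the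
--     # index of the first word that does not fit.
--     prefixes = []
--     total = 0
--     for w in list_of_strings:
--         total += len(w) + 1
--         prefixes.append(total)
--     return sum(1 for p in prefixes if p <= lines_per_row + 1)
-- ===== Notes on version B (the rewrite author's own statement) =====
-- stated objective: alternative
-- what changed: Replaces the two-counter scan with early break by building the strictly increasing prefix-sum list of costs len(w)+1 and counting how many prefixes stay within lines_per_row+1.
import Mathlib
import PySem

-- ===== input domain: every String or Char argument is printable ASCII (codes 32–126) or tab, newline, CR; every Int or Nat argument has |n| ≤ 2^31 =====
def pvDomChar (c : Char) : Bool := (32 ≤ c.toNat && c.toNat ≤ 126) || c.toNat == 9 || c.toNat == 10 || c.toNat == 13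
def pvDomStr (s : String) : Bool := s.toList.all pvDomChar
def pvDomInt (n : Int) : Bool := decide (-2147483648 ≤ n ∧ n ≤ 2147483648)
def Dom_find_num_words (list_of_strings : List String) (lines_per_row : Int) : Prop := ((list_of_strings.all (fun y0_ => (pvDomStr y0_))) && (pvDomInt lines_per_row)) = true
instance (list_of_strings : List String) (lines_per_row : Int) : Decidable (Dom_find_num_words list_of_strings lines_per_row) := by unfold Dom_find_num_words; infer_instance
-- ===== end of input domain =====

-- B replaces A's early-breaking scan by a prefix-sum list plus a count of prefixes within the threshold (objective: alternative).

-- ===== PORT A =====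
-- while loop of A: walks the words from `index`, carrying `counter`; stops (returning index) at the first word that overflows
def fnwLoop (lines_per_row : Int) : List String → Int → Int → Int
  | [], _, index => index
  | w :: rest, counter, index =>
    let c := counter + (PySem.Str.len w : Int)
    if c > lines_per_row then index
    else fnwLoop lines_per_row rest (c + 1) (index + 1)

def find_num_words (list_of_strings : List String) (lines_per_row : Int) : Int :=
  fnwLoop lines_per_row list_of_strings 0 0

-- ===== PORT B =====
-- first pass of B: builds the prefix-sum list (running total, appended list)
def fnwPrefixes (list_of_strings : List String) : List Int :=
  (list_of_strings.foldl
    (fun (s : Int × List Int) w =>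
      let t := s.1 + (PySem.Str.len w : Int) + 1
      (t, s.2 ++ [t]))
    (0, [])).2

def find_num_words_alt (list_of_strings : List String) (lines_per_row : Int) : Int :=
  (fnwPrefixes list_of_strings).foldl
    (fun c p => if p ≤ lines_per_row + 1 then c + 1 else c) 0

-- ===== PRECONDITION & SPEC =====
def Spec_find_num_words (list_of_strings : List String) (lines_per_row : Int) (out : Int) : Prop := out = find_num_words_alt list_of_strings lines_per_row
instance (list_of_strings : List String) (lines_per_row : Int) (out : Int) : Decidable (Spec_find_num_words list_of_strings lines_per_row out) := by unfold Spec_find_num_words; infer_instance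

-- ===== CLAIM (what is proved, stated in full; the proofs are below) =====
def Claim_equal_find_num_words : Prop := ∀ (list_of_strings : List String) (lines_per_row : Int), Dom_find_num_words list_of_strings lines_per_row → Spec_find_num_words list_of_strings lines_per_row (find_num_words list_of_strings lines_per_row)

-- ===== LEMMAS AND PROOFS =====

-- recursive form of the prefix-sum list, starting from total t
def fnwPrefAux (t : Int) : List String → List Int
  | [] => []
  | w :: rest => (t + (PySem.Str.len w : Int) + 1) :: fnwPrefAux (t + (PySem.Str.len w : Int) + 1) rest

-- the fold of B's first pass equals appending fnwPrefAux to the accumulator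
theorem fnwPrefixes_fold (xs : List String) :
    ∀ (t : Int) (acc : List Int),
      (xs.foldl (fun (s : Int × List Int) w =>
          let u := s.1 + (PySem.Str.len w : Int) + 1
          (u, s.2 ++ [u])) (t, acc)).2 = acc ++ fnwPrefAux t xs := by
  induction xs with
  | nil => intro t acc; simp [fnwPrefAux]
  | cons w rest ih =>
    intro t acc
    simp only [List.foldl, fnwPrefAux]
    rw [ih]
    simp

def fnwCount (T : Int) (l : List Int) : Int :=
  l.foldl (fun c p => if p ≤ T then c + 1 else c) 0

theorem fnwCount_shift (T : Int) (l : List Int) :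
    ∀ c : Int, l.foldl (fun c p => if p ≤ T then c + 1 else c) c = c + fnwCount T l := by
  induction l with
  | nil => intro c; simp [fnwCount]
  | cons p rest ih =>
    intro c
    simp only [List.foldl, fnwCount]
    rw [ih, ih ((if p ≤ T then (0:Int) + 1 else 0))]
    split_ifs <;> ring

-- once the running total has overflowed, every later prefix overflows too
theorem fnwCount_zero (L : Int) (xs : List String) :
    ∀ t : Int, t > L → fnwCount (L + 1) (fnwPrefAux t xs) = 0 := by
  induction xs with
  | nil => intro t _; simp [fnwPrefAux, fnwCount]
  | cons w rest ih =>
    intro t ht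
    have hw : (0:Int) ≤ (PySem.Str.len w : Int) := Int.natCast_nonneg _
    have ht' : t + (PySem.Str.len w : Int) + 1 > L := by omega
    simp only [fnwPrefAux, fnwCount, List.foldl]
    rw [if_neg (by omega), fnwCount_shift]
    rw [show fnwCount (L+1) (fnwPrefAux (t + (PySem.Str.len w : Int) + 1) rest)
          = 0 from ih _ ht']
    ring

-- main invariant: A's loop equals index + count of in-threshold prefixes from the same total
theorem fnwLoop_eq_count (L : Int) (xs : List String) :
    ∀ (counter index : Int),
      fnwLoop L xs counter index = index + fnwCount (L + 1) (fnwPrefAux counter xs) := by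
  induction xs with
  | nil => intro c i; simp [fnwLoop, fnwPrefAux, fnwCount]
  | cons w rest ih =>
    intro c i
    simp only [fnwLoop, fnwPrefAux, fnwCount, List.foldl]
    by_cases h : c + (PySem.Str.len w : Int) > L
    · rw [if_pos h, if_neg (by omega), fnwCount_shift]
      rw [show fnwCount (L+1) (fnwPrefAux (c + (PySem.Str.len w : Int) + 1) rest)
            = 0 from fnwCount_zero L rest _ (by omega)]
      ring
    · rw [if_neg h, if_pos (by omega), ih, fnwCount_shift]
      simp only [fnwCount]
      ring

-- ===== VERDICT (by name: the statement is the Claim_ definition above) =====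
theorem find_num_words_spec : Claim_equal_find_num_words := by
  intro xs L _
  unfold Spec_find_num_words find_num_words find_num_words_alt fnwPrefixes
  rw [fnwPrefixes_fold xs 0 []]
  simpa [fnwCount] using fnwLoop_eq_count L xs 0 0
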